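-- pv_equiv track=rewrite | github.com/gulliver8/VUT_SFC | aco_functions.py | update_elite
-- ===== SOURCE A (Python) =====
-- def update_elite(elite_matrix, tabu_list):
--     # create zero matrix with same size as elite_matrix
--     matrix = [[0 for _ in row] for row in elite_matrix]
--     # on the path of the solution add 1 to the matrix
--     for a, b in zip(tabu_list, tabu_list[1:] + tabu_list[:1]):
--         matrix[a][b] += 1
--
--     #element-wise product of the elite_matrix and matrix -which marks the path of tabu_list
--     product_matrix = [
--         [elite_matrix[i][j] * matrix[i][j] for j in range(len(elite_matrix[i]))]
--         for i in range(len(elite_matrix))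
--     ]
--     return product_matrix
-- ===== SOURCE B (Python) =====
-- def update_elite(elite_matrix, tabu_list):
--     # Start from a zero matrix and add the elite weight once per traversed edge,
--     # skipping A's full element-wise multiplication pass.
--     result = [[0] * len(row) for row in elite_matrix]
--     for a, b in zip(tabu_list, tabu_list[1:] + tabu_list[:1]):
--         result[a][b] += elite_matrix[a][b]
--     return result
-- ===== Notes on version B (the rewrite author's own statement) =====
-- stated objective: simpler
-- what changed: B builds the result in the single pass over the path edges by adding elite_matrix[a][b] at each edge (accumulating on repeats), dropping A's intermediate 0/1-count matrix and its full n*n element-wise multiplication pass.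
import Mathlib
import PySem

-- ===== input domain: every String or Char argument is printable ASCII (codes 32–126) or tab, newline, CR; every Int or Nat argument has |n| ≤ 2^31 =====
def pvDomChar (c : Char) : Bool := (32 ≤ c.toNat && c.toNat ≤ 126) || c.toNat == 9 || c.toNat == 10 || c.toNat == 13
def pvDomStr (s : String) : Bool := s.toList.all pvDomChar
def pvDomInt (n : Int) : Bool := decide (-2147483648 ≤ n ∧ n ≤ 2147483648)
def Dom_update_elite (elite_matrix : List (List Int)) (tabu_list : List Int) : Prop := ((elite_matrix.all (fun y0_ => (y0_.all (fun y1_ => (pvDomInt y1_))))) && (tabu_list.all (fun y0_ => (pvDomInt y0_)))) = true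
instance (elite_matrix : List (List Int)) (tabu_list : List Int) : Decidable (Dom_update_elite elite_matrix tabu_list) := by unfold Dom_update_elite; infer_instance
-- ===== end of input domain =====

-- B accumulates the elite weights directly along the path, skipping A's counter
-- matrix and its full element-wise multiplication pass (objective: simpler).

-- ===== PORT A =====
-- body of A's `matrix[a][b] += 1` loop (pyGetD/pySetD are exact under Pre_, which keeps both indices in range)
def pvStepA (m : List (List Int)) (p : Int × Int) : List (List Int) :=
  let row := PySem.List.pyGetD m p.1 []
  PySem.List.pySetD m p.1 (PySem.List.pySetD row p.2 (PySem.List.pyGetD row p.2 0 + 1))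

-- A's final element-wise product comprehension
def pvProd (em m : List (List Int)) : List (List Int) :=
  (PySem.List.pyRange 0 (PySem.List.len em)).map (fun i =>
    (PySem.List.pyRange 0 (PySem.List.len (PySem.List.pyGetD em i []))).map (fun j =>
      PySem.List.pyGetD (PySem.List.pyGetD em i []) j 0 *
      PySem.List.pyGetD (PySem.List.pyGetD m i []) j 0))

def update_elite (elite_matrix : List (List Int)) (tabu_list : List Int) : List (List Int) :=
  let matrix0 := elite_matrix.map (fun row => row.map (fun _ => (0 : Int)))
  let matrix := (tabu_list.zip (PySem.List.slice tabu_list (some 1) none ++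
                                 PySem.List.slice tabu_list none (some 1))).foldl pvStepA matrix0
  pvProd elite_matrix matrix

-- ===== PORT B =====
-- body of B's `result[a][b] += elite_matrix[a][b]` loop
def pvStepB (em : List (List Int)) (m : List (List Int)) (p : Int × Int) : List (List Int) :=
  let row := PySem.List.pyGetD m p.1 []
  PySem.List.pySetD m p.1 (PySem.List.pySetD row p.2
    (PySem.List.pyGetD row p.2 0 + PySem.List.pyGetD (PySem.List.pyGetD em p.1 []) p.2 0))

def update_elite_alt (elite_matrix : List (List Int)) (tabu_list : List Int) : List (List Int) :=
  let result := elite_matrix.map (fun row => List.replicate row.length (0 : Int))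
  (tabu_list.zip (PySem.List.slice tabu_list (some 1) none ++
                   PySem.List.slice tabu_list none (some 1))).foldl (pvStepB elite_matrix) result

-- ===== PRECONDITION & SPEC =====
-- Pre_ excludes exactly the inputs where A raises IndexError: a path index out of range
-- for the matrix, or a second index out of range for the addressed row.
def Pre_update_elite (elite_matrix : List (List Int)) (tabu_list : List Int) : Prop :=
  ∀ p ∈ tabu_list.zip (tabu_list.tail ++ tabu_list.take 1),
    PySem.Raise.InRange elite_matrix.length p.1 ∧
    PySem.Raise.InRange (PySem.List.pyGetD elite_matrix p.1 []).length p.2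
instance (elite_matrix : List (List Int)) (tabu_list : List Int) : Decidable (Pre_update_elite elite_matrix tabu_list) := by unfold Pre_update_elite; infer_instance

def pvWitness_update_elite : List (List Int) × List Int := ([[2, 3], [4, 5]], [0, 1])

def Spec_update_elite (elite_matrix : List (List Int)) (tabu_list : List Int) (out : List (List Int)) : Prop := out = update_elite_alt elite_matrix tabu_list
instance (elite_matrix : List (List Int)) (tabu_list : List Int) (out : List (List Int)) : Decidable (Spec_update_elite elite_matrix tabu_list out) := by unfold Spec_update_elite; infer_instance

-- ===== CLAIM (what is proved, stated in full; the proofs are below) =====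
def Claim_equal_update_elite : Prop := ∀ (elite_matrix : List (List Int)) (tabu_list : List Int), Dom_update_elite elite_matrix tabu_list → Pre_update_elite elite_matrix tabu_list → Spec_update_elite elite_matrix tabu_list (update_elite elite_matrix tabu_list)

-- ===== LEMMAS AND PROOFS =====

-- shape agreement between the elite matrix and an accumulator
def pvSh (em m : List (List Int)) : Prop :=
  m.length = em.length ∧ ∀ k : Nat, (m.getD k []).length = (em.getD k []).length

lemma pvIdx_resolve {n : Nat} {a : Int} (h : PySem.Raise.InRange n a) :
    ∃ i : Nat, i < n ∧ PySem.List.pyIdx? n a = some i := by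
  obtain ⟨h1, h2⟩ := h
  simp only [PySem.List.pyIdx?]
  by_cases h0 : 0 ≤ a
  · exact ⟨a.toNat, by omega, by simp [h0, h2]⟩
  · exact ⟨n - (-a).toNat, by omega, by simp [h0, h1]⟩

lemma pvGetD_resolve {α : Type} {m : List α} {i : Nat} {a : Int}
    (hi : PySem.List.pyIdx? m.length a = some i) (d : α) :
    PySem.List.pyGetD m a d = m.getD i d := by
  simp [PySem.List.pyGetD, PySem.List.pyGet?, hi, List.getD_eq_getElem?_getD]

lemma pvSetD_resolve {α : Type} {m : List α} {i : Nat} {a : Int}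
    (hi : PySem.List.pyIdx? m.length a = some i) (v : α) :
    PySem.List.pySetD m a v = m.set i v := by
  simp [PySem.List.pySetD, PySem.List.pySet?, hi]

lemma pvGetD_set_self {α : Type} (l : List α) (i : Nat) (v d : α) (h : i < l.length) :
    (l.set i v).getD i d = v := by
  rw [List.getD_eq_getElem?_getD, List.getElem?_set_self h]; rfl

lemma pvGetD_set_ne {α : Type} (l : List α) {i k : Nat} (v d : α) (h : i ≠ k) :
    (l.set i v).getD k d = l.getD k d := by
  rw [List.getD_eq_getElem?_getD, List.getElem?_set_ne h, ← List.getD_eq_getElem?_getD]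

-- pvProd written over Nat ranges and getD
lemma pvProd_eq (em m : List (List Int)) :
    pvProd em m = (List.range em.length).map (fun i =>
      (List.range (em.getD i []).length).map (fun j =>
        (em.getD i []).getD j 0 * ((m.getD i []).getD j 0))) := by
  simp [pvProd, PySem.List.len_eq, PySem.List.pyRange_zero_natCast, List.map_map,
    Function.comp_def]

lemma pvProd_length (em m : List (List Int)) : (pvProd em m).length = em.length := by
  simp [pvProd_eq]

lemma pvSh_zero (em : List (List Int)) : pvSh em (em.map (fun row => row.map (fun _ => (0 : Int)))) := by
  refine ⟨by simp, fun k => ?_⟩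
  rw [List.getD_eq_getElem?_getD, List.getD_eq_getElem?_getD, List.getElem?_map]
  cases em[k]? <;> simp

lemma pvProd_zero (em : List (List Int)) :
    pvProd em (em.map (fun row => row.map (fun _ => (0 : Int)))) =
      em.map (fun row => List.replicate row.length (0 : Int)) := by
  rw [pvProd_eq]
  apply List.ext_getElem (by simp)
  intro i hi hi'
  have him : i < em.length := by simpa using hi'
  simp only [List.getElem_map, List.getElem_range]
  have hz : ((em.map (fun row => row.map (fun _ => (0:Int)))).getD i []) = em[i].map (fun _ => (0:Int)) := by
    rw [List.getD_eq_getElem?_getD, List.getElem?_map, List.getElem?_eq_getElem him]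
    rfl
  have he : em.getD i [] = em[i] := List.getD_eq_getElem em [] him
  rw [hz, he]
  apply List.ext_getElem (by simp)
  intro j hj hj'
  have hjm : j < em[i].length := by simpa using hj'
  simp only [List.getElem_map, List.getElem_range, List.getElem_replicate]
  have hz2 : (List.map (fun _ => (0:Int)) em[i]).getD j 0 = 0 := by
    rw [List.getD_eq_getElem?_getD, List.getElem?_map, List.getElem?_eq_getElem hjm]
    rfl
  rw [hz2, mul_zero]

-- one edge: multiplying after the +1 increment equals adding the elite entry directly
lemma pvStep_eq (em m : List (List Int)) (p : Int × Int) (hsh : pvSh em m)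
    (ha : PySem.Raise.InRange em.length p.1)
    (hb : PySem.Raise.InRange (PySem.List.pyGetD em p.1 []).length p.2) :
    pvProd em (pvStepA m p) = pvStepB em (pvProd em m) p ∧ pvSh em (pvStepA m p) := by
  obtain ⟨hlen, hrow⟩ := hsh
  obtain ⟨i, hi, hidx⟩ := pvIdx_resolve ha
  have hidx_m : PySem.List.pyIdx? m.length p.1 = some i := by rwa [hlen]
  have hidx_P : PySem.List.pyIdx? (pvProd em m).length p.1 = some i := by
    rwa [pvProd_length]
  have hi_m : i < m.length := by omega
  have hemi : PySem.List.pyGetD em p.1 [] = em.getD i [] := pvGetD_resolve hidx []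
  have hmi : PySem.List.pyGetD m p.1 [] = m.getD i [] := pvGetD_resolve hidx_m []
  have hrlen : (m.getD i []).length = (em.getD i []).length := hrow i
  rw [hemi] at hb
  obtain ⟨j, hj, hjdx⟩ := pvIdx_resolve hb
  have hjdx_m : PySem.List.pyIdx? (m.getD i []).length p.2 = some j := by rwa [hrlen]
  have hA : pvStepA m p =
      m.set i ((m.getD i []).set j ((m.getD i []).getD j 0 + 1)) := by
    rw [pvStepA]
    simp only [hmi]
    rw [pvGetD_resolve hjdx_m, pvSetD_resolve hjdx_m, pvSetD_resolve hidx_m]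
  have hMi : (pvProd em m).getD i [] = (List.range (em.getD i []).length).map
      (fun j' => (em.getD i []).getD j' 0 * ((m.getD i []).getD j' 0)) := by
    rw [pvProd_eq]
    exact PySem.List.getD_map_range _ _ _ _ hi
  have hMi_len : ((pvProd em m).getD i []).length = (em.getD i []).length := by
    rw [hMi]; simp
  have hjdx_M : PySem.List.pyIdx? ((pvProd em m).getD i []).length p.2 = some j := by
    rwa [hMi_len]
  have hMij : ((pvProd em m).getD i []).getD j 0 =
      (em.getD i []).getD j 0 * ((m.getD i []).getD j 0) := by
    rw [hMi]; exact PySem.List.getD_map_range _ _ _ _ hj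
  have hB : pvStepB em (pvProd em m) p =
      (pvProd em m).set i (((pvProd em m).getD i []).set j
        (((pvProd em m).getD i []).getD j 0 + (em.getD i []).getD j 0)) := by
    rw [pvStepB]
    simp only [pvGetD_resolve hidx_P, hemi]
    rw [pvGetD_resolve hjdx_M, pvGetD_resolve hjdx, pvSetD_resolve hjdx_M,
      pvSetD_resolve hidx_P]
  constructor
  · rw [hA, hB, pvProd_eq]
    apply List.ext_getElem (by simp [pvProd_length])
    intro i' hi1 hi2
    have hi1' : i' < em.length := by simpa using hi1
    have hi1P : i' < (pvProd em m).length := by rw [pvProd_length]; omega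
    simp only [List.getElem_map, List.getElem_range]
    by_cases hii : i' = i
    · subst hii
      rw [List.getElem_set_self hi2]
      rw [pvGetD_set_self _ _ _ _ hi_m]
      apply List.ext_getElem
        (by rw [List.length_map, List.length_range, List.length_set, hMi_len])
      intro j' hj1 hj2
      have hj1' : j' < (em.getD i' []).length := by simpa using hj1
      have hj1m : j' < (m.getD i' []).length := by omega
      simp only [List.getElem_map, List.getElem_range]
      by_cases hjj : j' = j
      · subst hjj
        rw [List.getElem_set_self hj2, pvGetD_set_self _ _ _ _ hj1m, hMij]
        ring
      · rw [List.getElem_set_ne (fun h => hjj h.symm) hj2,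
          ← List.getD_eq_getElem _ 0 (by rw [hMi_len]; exact hj1'),
          hMi, PySem.List.getD_map_range _ _ _ _ hj1',
          pvGetD_set_ne _ _ _ (fun h => hjj h.symm)]
    · rw [List.getElem_set_ne (fun h => hii h.symm) hi2,
        ← List.getD_eq_getElem _ [] hi1P]
      rw [pvProd_eq, PySem.List.getD_map_range _ _ _ _ hi1']
      simp only [pvGetD_set_ne _ _ _ (fun h => hii h.symm)]
  · rw [hA]
    refine ⟨by simpa using hlen, fun k => ?_⟩
    by_cases hk : k = i
    · subst hk
      rw [pvGetD_set_self _ _ _ _ hi_m, List.length_set]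
      exact hrow k
    · rw [pvGetD_set_ne _ _ _ (fun h => hk h.symm)]
      exact hrow k

lemma pvInv (em : List (List Int)) :
    ∀ (E : List (Int × Int)) (m : List (List Int)), pvSh em m →
      (∀ p ∈ E, PySem.Raise.InRange em.length p.1 ∧
        PySem.Raise.InRange (PySem.List.pyGetD em p.1 []).length p.2) →
      E.foldl (pvStepB em) (pvProd em m) = pvProd em (E.foldl pvStepA m) := by
  intro E
  induction E with
  | nil => intro m _ _; rfl
  | cons p E ih =>
    intro m hsh hpre
    obtain ⟨heq, hsh'⟩ := pvStep_eq em m p hsh (hpre p (by simp)).1 (hpre p (by simp)).2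
    simp only [List.foldl_cons]
    rw [← heq]
    exact ih _ hsh' (fun q hq => hpre q (by simp [hq]))

lemma pvSlices (tabu_list : List Int) :
    PySem.List.slice tabu_list (some 1) none ++ PySem.List.slice tabu_list none (some 1) =
      tabu_list.tail ++ tabu_list.take 1 := by
  rw [PySem.List.slice_from_one]
  simp [pysem]

-- ===== VERDICT (by name: the statement is the Claim_ definition above) =====
theorem update_elite_spec : Claim_equal_update_elite := by
  intro em tabu _ hpre
  unfold Pre_update_elite at hpre
  unfold Spec_update_elite update_elite update_elite_alt
  rw [pvSlices, ← pvProd_zero em]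
  exact (pvInv em _ _ (pvSh_zero em) (by simpa [pvSlices] using hpre)).symm
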